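-- pv_equiv track=rewrite | github.com/KevinPham-BME-Prog/CCPS109-lab-upload | labs109(1).py | count_word_dominators
-- ===== SOURCE A (Python) =====
-- def count_word_dominators(words):
--   checker = 0
--   count = 0
--   word_checker = 0
--   for i in range(len(words)):
--     checker = 0
--     word_checker = 0
--     for x in range(i+1, len(words)):
--       if len(words[i]) > len(words[x]):
--         checker += 1
--       elif len(words[i]) == len(words[x]):
--         for y in range(len(words[i])):
--           if words[i][y] > words[x][y]:
--             word_checker += 1
--           else:
--             word_checker -= 1
--         if word_checker > 0:
--           checker += 1
--           word_checker = 0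
--     if checker == len(words[i+1:]):
--       count += 1
--   return count
-- ===== SOURCE B (Python) =====
-- def count_word_dominators(words):
--     def dominates(w, v):
--         if len(w) > len(v):
--             return True
--         if len(w) == len(v):
--             return sum(1 if a > b else -1 for a, b in zip(w, v)) > 0
--         return False
--     count = 0
--     rest = list(words)
--     while rest:
--         w = rest.pop(0)
--         if all(dominates(w, v) for v in rest):
--             count += 1
--     return count
-- ===== Notes on version B (the rewrite author's own statement) =====
-- stated objective: simpler
-- what changed: Replaces A's carried checker/word_checker counters compared against the suffix length by a direct per-pair dominance predicate tested with short-circuiting all() over the remaining words (the path-dependent word_checker carry is dropped: it is provably dead, since any non-incrementing comparison already breaks the checker==total equality); the short-circuit also exits each suffix scan at the first non-dominated word where A always scans the whole suffix.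
import Mathlib
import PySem

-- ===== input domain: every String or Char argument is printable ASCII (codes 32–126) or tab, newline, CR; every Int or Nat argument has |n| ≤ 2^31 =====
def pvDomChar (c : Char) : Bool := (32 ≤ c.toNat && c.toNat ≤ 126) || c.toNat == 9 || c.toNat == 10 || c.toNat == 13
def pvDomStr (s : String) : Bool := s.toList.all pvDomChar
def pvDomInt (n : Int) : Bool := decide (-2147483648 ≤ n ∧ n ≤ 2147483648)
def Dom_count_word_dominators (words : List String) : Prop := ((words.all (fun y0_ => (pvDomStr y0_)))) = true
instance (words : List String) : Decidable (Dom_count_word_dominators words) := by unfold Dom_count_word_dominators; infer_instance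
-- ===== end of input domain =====

-- B replaces A's carried word_checker/checker counters by a per-pair dominance test with
-- short-circuit `all` over the remaining suffix (objective: simpler; same asymptotic cost).

-- ===== PORT A =====
-- the y-loop: for y in range(len(words[i])): word_checker += 1 if words[i][y] > words[x][y] else -1
def cwdCharLoop (wi wx : String) (wc : Int) : Int :=
  (PySem.List.pyRange 0 (PySem.Str.len wi)).foldl
    (fun wc y =>
      if PySem.List.pyGetD wi.toList y ' ' > PySem.List.pyGetD wx.toList y ' ' then wc + 1 else wc - 1)
    wc

-- one iteration of the x-loop body on the state (checker, word_checker)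
def cwdStep (wi : String) (st : Int × Int) (wx : String) : Int × Int :=
  if PySem.Str.len wi > PySem.Str.len wx then (st.1 + 1, st.2)
  else if PySem.Str.len wi == PySem.Str.len wx then
    (let wc := cwdCharLoop wi wx st.2;
     if wc > 0 then (st.1 + 1, (0 : Int)) else (st.1, wc))
  else st

def count_word_dominators (words : List String) : Int :=
  (PySem.List.pyRange 0 (PySem.List.len words)).foldl
    (fun count i =>
      let st := (PySem.List.pyRange (i + 1) (PySem.List.len words)).foldl
        (fun st x => cwdStep (PySem.List.pyGetD words i "") st (PySem.List.pyGetD words x ""))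
        ((0 : Int), (0 : Int));
      if st.1 == PySem.List.len (PySem.List.slice words (some (i + 1))) then count + 1 else count)
    0

-- ===== PORT B =====
-- sum(1 if a > b else -1 for a, b in zip(w, v))
def pvCmp (W V : List Char) : Int :=
  ((W.zip V).map (fun p => if p.2 < p.1 then (1 : Int) else -1)).sum

def dominates (w v : String) : Bool :=
  if PySem.Str.len w > PySem.Str.len v then true
  else if PySem.Str.len w == PySem.Str.len v then decide (0 < pvCmp w.toList v.toList)
  else false

-- while rest: w = rest.pop(0); count += all(dominates(w, v) for v in rest)
def altGo (count : Int) : List String → Int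
  | [] => count
  | w :: rest => altGo (if rest.all (fun v => dominates w v) then count + 1 else count) rest

def count_word_dominators_alt (words : List String) : Int := altGo 0 words

-- ===== PRECONDITION & SPEC =====
def Spec_count_word_dominators (words : List String) (out : Int) : Prop := out = count_word_dominators_alt words
instance (words : List String) (out : Int) : Decidable (Spec_count_word_dominators words out) := by unfold Spec_count_word_dominators; infer_instance

-- ===== CLAIM (what is proved, stated in full; the proofs are below) =====
def Claim_equal_count_word_dominators : Prop := ∀ (words : List String), Dom_count_word_dominators words → Spec_count_word_dominators words (count_word_dominators words)

-- ===== LEMMAS AND PROOFS =====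

lemma pvCmp_cons (a b : Char) (W V : List Char) :
    pvCmp (a :: W) (b :: V) = (if b < a then (1 : Int) else -1) + pvCmp W V := by
  simp [pvCmp]

-- the y-loop adds the zip comparison sum of the suffixes from k on
lemma yloop (m : Nat) : ∀ (W V : List Char), V.length = W.length →
    ∀ (k : Nat) (wc : Int), W.length ≤ k + m →
    (PySem.List.pyRange (k : Int) ((W.length : Nat) : Int)).foldl
      (fun wc y =>
        if PySem.List.pyGetD W y ' ' > PySem.List.pyGetD V y ' ' then wc + 1 else wc - 1) wc
    = wc + pvCmp (W.drop k) (V.drop k) := by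
  induction m with
  | zero =>
    intro W V hl k wc hk
    rw [PySem.List.pyRange_one_eq_nil (by exact_mod_cast hk)]
    rw [List.drop_eq_nil_of_le (by omega), List.drop_eq_nil_of_le (by omega)]
    simp [pvCmp]
  | succ m ih =>
    intro W V hl k wc hk
    by_cases hlt : k < W.length
    · rw [PySem.List.pyRange_one_cons (by exact_mod_cast hlt)]
      simp only [List.foldl_cons]
      have h1 : ((k : Int) + 1) = (((k + 1 : Nat)) : Int) := by push_cast; ring
      rw [h1, ih W V hl (k + 1) _ (by omega)]
      rw [List.drop_eq_getElem_cons hlt, List.drop_eq_getElem_cons (by omega : k < V.length)]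
      rw [pvCmp_cons]
      have hW : PySem.List.pyGetD W (k : Int) ' ' = W[k] := by
        simp [PySem.List.pyGetD_natCast, List.getD, List.getElem?_eq_getElem hlt]
      have hV : PySem.List.pyGetD V (k : Int) ' ' = V[k] := by
        simp [PySem.List.pyGetD_natCast, List.getD,
          List.getElem?_eq_getElem (by omega : k < V.length)]
      rw [hW, hV]
      split_ifs with h <;> ring
    · rw [PySem.List.pyRange_one_eq_nil (by exact_mod_cast (by omega : W.length ≤ k))]
      rw [List.drop_eq_nil_of_le (by omega), List.drop_eq_nil_of_le (by omega)]
      simp [pvCmp]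

lemma charLoop_eq (wi wx : String) (wc : Int)
    (hl : wx.toList.length = wi.toList.length) :
    cwdCharLoop wi wx wc = wc + pvCmp wi.toList wx.toList := by
  unfold cwdCharLoop
  rw [PySem.Str.len_eq]
  have := yloop wi.toList.length wi.toList wx.toList hl 0 wc (by omega)
  simpa using this

lemma len_toList_eq (wi v : String) (h2 : PySem.Str.len wi = PySem.Str.len v) :
    v.toList.length = wi.toList.length := by
  have e1 := PySem.Str.len_eq wi
  have e2 := PySem.Str.len_eq v
  rw [e1, e2] at h2
  exact_mod_cast h2.symm

-- cwdStep in the equal-length case, with word_checker 0, computes the comparison sum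
lemma step_char (wi v : String) (c : Int)
    (h1 : ¬ PySem.Str.len wi > PySem.Str.len v) (h2 : PySem.Str.len wi = PySem.Str.len v) :
    cwdStep wi (c, 0) v
      = if 0 < pvCmp wi.toList v.toList then (c + 1, 0) else (c, pvCmp wi.toList v.toList) := by
  unfold cwdStep
  rw [if_neg h1, if_pos (by simp only [beq_iff_eq]; exact h2)]
  show (if cwdCharLoop wi v 0 > 0 then (c + 1, (0 : Int)) else (c, cwdCharLoop wi v 0)) = _
  rw [charLoop_eq wi v 0 (len_toList_eq wi v h2)]
  simp only [zero_add, gt_iff_lt]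

lemma step_dom (wi v : String) (c : Int) (h : dominates wi v = true) :
    cwdStep wi (c, 0) v = (c + 1, 0) := by
  by_cases h1 : PySem.Str.len wi > PySem.Str.len v
  · unfold cwdStep; rw [if_pos h1]
  · by_cases h2 : PySem.Str.len wi = PySem.Str.len v
    · have hp : 0 < pvCmp wi.toList v.toList := by
        unfold dominates at h
        rw [if_neg h1, if_pos (by simp only [beq_iff_eq]; exact h2)] at h
        simpa using h
      rw [step_char wi v c h1 h2, if_pos hp]
    · exfalso
      unfold dominates at h
      rw [if_neg h1, if_neg (by simp only [beq_iff_eq]; exact h2)] at h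
      simp at h

lemma step_ndom (wi v : String) (c : Int) (h : dominates wi v = false) :
    (cwdStep wi (c, 0) v).1 = c := by
  by_cases h1 : PySem.Str.len wi > PySem.Str.len v
  · exfalso
    unfold dominates at h
    rw [if_pos h1] at h
    simp at h
  · by_cases h2 : PySem.Str.len wi = PySem.Str.len v
    · have hp : ¬ 0 < pvCmp wi.toList v.toList := by
        unfold dominates at h
        rw [if_neg h1, if_pos (by simp only [beq_iff_eq]; exact h2)] at h
        simpa using h
      rw [step_char wi v c h1 h2, if_neg hp]
    · unfold cwdStep
      rw [if_neg h1, if_neg (by simp only [beq_iff_eq]; exact h2)]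

lemma fold_fst_le (wi : String) : ∀ (rest : List String) (st : Int × Int),
    (rest.foldl (cwdStep wi) st).1 ≤ st.1 + rest.length := by
  intro rest
  induction rest with
  | nil => intro st; simp
  | cons v rest ih =>
    intro st
    have hb : (cwdStep wi st v).1 ≤ st.1 + 1 := by
      unfold cwdStep
      by_cases h1 : PySem.Str.len wi > PySem.Str.len v
      · rw [if_pos h1]
      · rw [if_neg h1]
        by_cases h2 : (PySem.Str.len wi == PySem.Str.len v) = true
        · rw [if_pos h2]
          show (if cwdCharLoop wi v st.2 > 0 then (st.1 + 1, (0 : Int))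
                else (st.1, cwdCharLoop wi v st.2)).1 ≤ st.1 + 1
          split_ifs <;> simp
        · rw [if_neg h2]; omega
    have := ih (cwdStep wi st v)
    simp only [List.foldl_cons, List.length_cons]
    push_cast
    omega

lemma fold_fst_eq_iff (wi : String) : ∀ (rest : List String) (c : Int),
    ((rest.foldl (cwdStep wi) (c, 0)).1 = c + rest.length) ↔ rest.all (fun v => dominates wi v) := by
  intro rest
  induction rest with
  | nil => intro c; simp
  | cons v rest ih =>
    intro c
    simp only [List.foldl_cons, List.all_cons, List.length_cons]
    by_cases hd : dominates wi v = true
    · rw [step_dom wi v c hd, hd]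
      have := ih (c + 1)
      constructor
      · intro h; simp only [Bool.true_and]; exact this.mp (by push_cast at h ⊢; omega)
      · intro h; simp only [Bool.true_and] at h
        have := this.mpr h; push_cast at this ⊢; omega
    · have hfst : (cwdStep wi (c, 0) v).1 = c :=
        step_ndom wi v c (by simpa using hd)
      have hle := fold_fst_le wi rest (cwdStep wi (c, 0) v)
      rw [hfst] at hle
      constructor
      · intro h; push_cast at h; omega
      · intro h; simp [hd] at h

lemma drop_append_cons (pre suf : List String) (w : String) :
    List.drop (pre.length + 1) (pre ++ w :: suf) = suf := by
  have h : pre ++ w :: suf = (pre ++ [w]) ++ suf := by simp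
  rw [h]
  have h2 : pre.length + 1 = (pre ++ [w]).length := by simp
  rw [h2, List.drop_left]

lemma getD_append_cons (pre suf : List String) (w d : String) :
    PySem.List.pyGetD (pre ++ w :: suf) ((pre.length : Nat) : Int) d = w := by
  simp [PySem.List.pyGetD_natCast, List.getD]

lemma outer (words : List String) (suf : List String) : ∀ (pre : List String) (count : Int),
    words = pre ++ suf →
    (PySem.List.pyRange ((pre.length : Nat) : Int) (PySem.List.len words)).foldl
      (fun count i =>
        let st := (PySem.List.pyRange (i + 1) (PySem.List.len words)).foldl
          (fun st x => cwdStep (PySem.List.pyGetD words i "") st (PySem.List.pyGetD words x ""))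
          ((0 : Int), (0 : Int));
        if st.1 == PySem.List.len (PySem.List.slice words (some (i + 1))) then count + 1 else count)
      count
    = altGo count suf := by
  induction suf with
  | nil =>
    intro pre count h
    subst h
    rw [PySem.List.pyRange_one_eq_nil (by simp [PySem.List.len_eq])]
    rfl
  | cons w suf ih =>
    intro pre count h
    subst h
    have hlt : ((pre.length : Nat) : Int) < PySem.List.len (pre ++ w :: suf) := by
      rw [PySem.List.len_eq]
      have : pre.length < (pre ++ w :: suf).length := by simp
      exact_mod_cast this
    rw [PySem.List.pyRange_one_cons hlt]
    simp only [List.foldl_cons]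
    have hw : PySem.List.pyGetD (pre ++ w :: suf) ((pre.length : Nat) : Int) "" = w :=
      getD_append_cons pre suf w ""
    have hdrop : List.drop (pre.length + 1) (pre ++ w :: suf) = suf := drop_append_cons pre suf w
    have hinner :
        (PySem.List.pyRange (((pre.length : Nat) : Int) + 1) (PySem.List.len (pre ++ w :: suf))).foldl
          (fun st x => cwdStep (PySem.List.pyGetD (pre ++ w :: suf) ((pre.length : Nat) : Int) "")
            st (PySem.List.pyGetD (pre ++ w :: suf) x ""))
          ((0 : Int), (0 : Int))
        = suf.foldl (cwdStep w) ((0 : Int), (0 : Int)) := by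
      rw [PySem.List.foldl_pyRange_pyGetD (pre ++ w :: suf) ""
        (cwdStep (PySem.List.pyGetD (pre ++ w :: suf) ((pre.length : Nat) : Int) ""))
        ((0 : Int), (0 : Int)) (by positivity)]
      simp only [hw, show (((pre.length : Nat) : Int) + 1).toNat = pre.length + 1 from by omega,
        hdrop]
    have hslice : PySem.List.len (PySem.List.slice (pre ++ w :: suf) (some (((pre.length : Nat) : Int) + 1)))
        = ((suf.length : Nat) : Int) := by
      rw [PySem.List.slice_from (pre ++ w :: suf) (by positivity)]
      rw [show (((pre.length : Nat) : Int) + 1).toNat = pre.length + 1 by omega, hdrop,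
        PySem.List.len_eq]
    have hcond : ((suf.foldl (cwdStep w) ((0 : Int), (0 : Int))).1 == ((suf.length : Nat) : Int))
        = suf.all (fun v => dominates w v) := by
      rcases hall : suf.all (fun v => dominates w v) with _ | _
      · have hne := (fold_fst_eq_iff w suf 0).not
        simp only [hall] at hne
        have : ¬ (suf.foldl (cwdStep w) ((0 : Int), (0 : Int))).1 = 0 + (suf.length : Int) := by
          simpa using hne.mpr (by simp)
        simp only [beq_eq_false_iff_ne, ne_eq]
        intro hc
        exact this (by omega)
      · have hq := (fold_fst_eq_iff w suf 0).mpr (by simp [hall])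
        simp only [beq_iff_eq]
        simpa using hq
    simp only [hinner, hslice, hcond]
    have halt : altGo count (w :: suf)
        = altGo (if (suf.all (fun v => dominates w v)) = true then count + 1 else count) suf := by
      simp [altGo]
    rw [halt]
    have hrec := ih (pre ++ [w])
      (if (suf.all (fun v => dominates w v)) = true then count + 1 else count) (by simp)
    simp only [List.length_append, List.length_cons, List.length_nil] at hrec
    have hcast : ((pre.length : Nat) : Int) + 1 = (((pre.length + 1 : Nat)) : Int) := by push_cast; ring
    rw [hcast]
    exact hrec

-- ===== VERDICT (by name: the statement is the Claim_ definition above) =====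
theorem count_word_dominators_spec : Claim_equal_count_word_dominators := by
  intro words _
  unfold Spec_count_word_dominators count_word_dominators count_word_dominators_alt
  have := outer words words [] 0 (by simp)
  simpa using this
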